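-- pv_equiv track=rewrite | github.com/bottino/aoc2025 | aoc2025/days/day02.py | _is_invalid_id
-- ===== SOURCE A (Python) =====
-- def _is_invalid_id(id: str) -> bool:
--     for n in range(2, len(id) + 1):
--         if len(id) % n != 0:
--             continue
--
--         m = len(id) // n
--         split_id = [id[i : i + m] for i in range(0, len(id), m)]
--
--         # All elements are the same
--         if len(set(split_id)) == 1:
--             return True
--     return False
-- ===== SOURCE B (Python) =====
-- def _is_invalid_id(id: str) -> bool:
--     # Periodicity trick: a string is a repetition of a shorter block
--     # iff it occurs in (id + id) at some offset strictly between 0 and len(id).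
--     return len(id) > 1 and (id + id).find(id, 1) < len(id)
-- ===== Notes on version B (the rewrite author's own statement) =====
-- stated objective: faster
-- what changed: Replaces the per-divisor chunk-splitting-and-set test with the classic linear self-overlap trick: the string is a repetition of a shorter block iff it occurs in id+id at an offset strictly between 0 and len(id), tested with one C-level find.
import Mathlib
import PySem

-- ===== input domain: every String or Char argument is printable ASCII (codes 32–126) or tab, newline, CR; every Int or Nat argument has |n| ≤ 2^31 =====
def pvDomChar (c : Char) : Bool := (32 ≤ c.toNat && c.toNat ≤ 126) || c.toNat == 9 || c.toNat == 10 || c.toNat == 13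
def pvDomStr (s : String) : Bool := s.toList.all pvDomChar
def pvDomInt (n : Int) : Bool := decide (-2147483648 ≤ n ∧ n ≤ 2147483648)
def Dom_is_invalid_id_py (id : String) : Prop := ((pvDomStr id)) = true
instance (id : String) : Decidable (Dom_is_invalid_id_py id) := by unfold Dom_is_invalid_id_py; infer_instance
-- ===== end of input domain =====

-- B replaces A's per-divisor chunk-splitting test by the linear self-overlap trick
-- ((id+id).find(id, 1) < len(id)); same return value on every input.

-- ===== PORT A =====
def is_invalid_id_py (id : String) : Bool :=
  let cs := id.toList
  (PySem.List.pyRange 2 ((cs.length : Int) + 1) 1).foldl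
    (fun acc n =>
      if acc then acc
      else if PySem.Int.mod (cs.length : Int) n ≠ 0 then acc   -- continue
      else
        let m := PySem.Int.floordiv (cs.length : Int) n
        let split_id := (PySem.List.pyRange 0 (cs.length : Int) m).map
          (fun i => PySem.List.slice cs (some i) (some (i + m)))
        if (PySem.Set.ofList split_id).length = 1 then true else acc)
    false

-- ===== PORT B =====
def is_invalid_id_py_alt (id : String) : Bool :=
  let cs := id.toList
  decide (1 < (cs.length : Int)) &&
    decide (PySem.Chars.findFrom (cs ++ cs) cs 1 < (cs.length : Int))

-- ===== PRECONDITION & SPEC =====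
def Spec_is_invalid_id_py (id : String) (out : Bool) : Prop := out = is_invalid_id_py_alt id
instance (id : String) (out : Bool) : Decidable (Spec_is_invalid_id_py id out) := by unfold Spec_is_invalid_id_py; infer_instance

-- ===== CLAIM (what is proved, stated in full; the proofs are below) =====
def Claim_equal_is_invalid_id_py : Prop := ∀ (id : String), Dom_is_invalid_id_py id → Spec_is_invalid_id_py id (is_invalid_id_py id)

-- ===== LEMMAS AND PROOFS =====

/-- The shared characterisation: `cs` is a concatenation of at least two copies
of a shorter block, phrased as a proper divisor-length period. -/
def PowCond (cs : List Char) : Prop :=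
  ∃ m : ℕ, 0 < m ∧ m < cs.length ∧ m ∣ cs.length ∧ cs.HasPeriod m

theorem setlen_one_iff (l : List (List Char)) :
    (PySem.Set.ofList l).length = 1 ↔ ∃ a, l ≠ [] ∧ ∀ y ∈ l, y = a := by
  cases l with
  | nil => simp [PySem.Set.ofList]
  | cons x xs =>
    rw [PySem.Set.ofList_cons]
    have hlen : (x :: (PySem.Set.ofList xs).discard x).length = 1
        ↔ (PySem.Set.ofList xs).discard x = [] := by
      simp [List.length_eq_zero_iff]
    rw [hlen, List.eq_nil_iff_forall_not_mem]
    constructor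
    · intro h
      refine ⟨x, by simp, ?_⟩
      intro y hy
      rcases List.mem_cons.mp hy with h' | hy'
      · exact h'
      · by_contra hne
        exact h y (by rw [PySem.Set.mem_discard, PySem.Set.mem_ofList]; exact ⟨hy', hne⟩)
    · rintro ⟨a, -, ha⟩
      have hx : x = a := ha x (by simp)
      intro y hy
      rw [PySem.Set.mem_discard, PySem.Set.mem_ofList] at hy
      exact hy.2 ((ha y (by simp [hy.1])).trans hx.symm)

theorem pyRange_zero_mul (m N : ℕ) (hm : 0 < m) :
    PySem.List.pyRange 0 ((m * N : ℕ) : Int) (m : Int)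
      = (List.range N).map (fun j => ((j * m : ℕ) : Int)) := by
  rw [PySem.List.pyRange_of_pos 0 _ (by exact_mod_cast hm)]
  have hcount : (if (0:Int) < ((m * N : ℕ) : Int) then ((((m*N:ℕ):Int) - 0 + m - 1) / m).toNat else 0) = N := by
    rcases Nat.eq_zero_or_pos N with rfl | hN
    · simp
    · have hpos : (0:Int) < ((m * N : ℕ) : Int) := by
        push_cast; positivity
      rw [if_pos hpos]
      have heq : ((m*N:ℕ):Int) - 0 + (m:Int) - 1 = ((m:Int) - 1) + (N:Int) * m := by
        push_cast; ring
      rw [heq, Int.add_mul_ediv_right _ _ (by exact_mod_cast hm.ne' : (m:Int) ≠ 0),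
        Int.ediv_eq_zero_of_lt (by omega) (by omega)]
      simp
  rw [hcount]
  apply List.map_congr_left
  intro j hj
  push_cast
  ring

theorem chunk_getElem? (cs : List Char) (m j r : ℕ) (hr : r < m) :
    ((cs.drop (j * m)).take m)[r]? = cs[j * m + r]? := by
  rw [List.getElem?_take, if_pos hr, List.getElem?_drop]

theorem chunks_eq_iff_hasPeriod (cs : List Char) (m N : ℕ) (hm : 0 < m)
    (hlen : m * N = cs.length) :
    (∀ j < N, (cs.drop (j * m)).take m = cs.take m) ↔ cs.HasPeriod m := by
  constructor
  · intro h
    rw [List.hasPeriod_iff_getElem?]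
    intro i hi
    set j := i / m with hj
    set r := i % m with hr
    have hrm : r < m := Nat.mod_lt _ hm
    have hi' : i = j * m + r := by
      have h0 := Nat.div_add_mod i m
      calc i = m * (i / m) + i % m := h0.symm
        _ = j * m + r := by rw [hj, hr, Nat.mul_comm]
    have hjN : j + 1 < N := by
      have h1 : j * m ≤ i := by rw [hj]; exact Nat.div_mul_le_self i m
      have h2 : m * (j + 1) < m * N := by
        have : m * (j + 1) = j * m + m := by ring
        omega
      exact Nat.lt_of_mul_lt_mul_left h2
    have e1 := chunk_getElem? cs m j r hrm
    have e2 := chunk_getElem? cs m (j+1) r hrm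
    have hcj : (cs.drop (j * m)).take m = (cs.drop ((j+1) * m)).take m := by
      rw [h j (by omega), h (j+1) hjN]
    rw [hi']
    calc cs[j * m + r]? = ((cs.drop (j * m)).take m)[r]? := e1.symm
      _ = ((cs.drop ((j+1) * m)).take m)[r]? := by rw [hcj]
      _ = cs[(j+1) * m + r]? := e2
      _ = cs[j * m + r + m]? := by ring_nf
  · intro per j hjN
    apply List.ext_getElem?
    intro r
    by_cases hrm : r < m
    · rw [chunk_getElem? cs m j r hrm, List.getElem?_take, if_pos hrm]
      have hin : j * m + r < cs.length := by
        have h3 : (j + 1) * m ≤ m * N := by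
          calc (j+1) * m ≤ N * m := Nat.mul_le_mul_right m hjN
            _ = m * N := Nat.mul_comm N m
        have h4 : (j + 1) * m = j * m + m := by ring
        omega
      have h1 := per.getElem?_mod m (j * m + r) cs hin
      have h2 : (j * m + r) % m = r := by
        rw [Nat.add_comm, Nat.add_mul_mod_self_right, Nat.mod_eq_of_lt hrm]
      rw [h2] at h1
      exact h1.symm
  -- r ≥ m: both none
    · rw [List.getElem?_eq_none (le_trans (List.length_take_le m _) (by omega)),
        List.getElem?_eq_none (le_trans (List.length_take_le m _) (by omega))]

theorem setcond_iff (cs : List Char) (N m : ℕ) (hm : 0 < m) (hN : 0 < N)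
    (hmN : m * N = cs.length) :
    (PySem.Set.ofList ((PySem.List.pyRange 0 (cs.length : Int) (m : Int)).map
        (fun i => PySem.List.slice cs (some i) (some (i + (m : Int)))))).length = 1
      ↔ cs.HasPeriod m := by
  rw [← hmN, pyRange_zero_mul m N hm, List.map_map]
  have hfun : ((fun i => PySem.List.slice cs (some i) (some (i + (m : Int)))) ∘
      (fun j => ((j * m : ℕ) : Int))) = fun j : ℕ => (cs.drop (j * m)).take m := by
    funext j
    exact PySem.List.slice_natCast_add cs (j * m) m
  rw [hfun, setlen_one_iff, ← chunks_eq_iff_hasPeriod cs m N hm hmN]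
  constructor
  · rintro ⟨a, -, ha⟩
    intro j hj
    have h0 : (cs.drop (0 * m)).take m = a :=
      ha _ (List.mem_map.mpr ⟨0, List.mem_range.mpr hN, rfl⟩)
    have hja : (cs.drop (j * m)).take m = a :=
      ha _ (List.mem_map.mpr ⟨j, List.mem_range.mpr hj, rfl⟩)
    rw [hja, ← h0]
    simp
  · intro h
    refine ⟨cs.take m, ?_, ?_⟩
    · simp [List.map_eq_nil_iff, List.range_eq_nil]
      omega
    · intro y hy
      obtain ⟨j, hj, rfl⟩ := List.mem_map.mp hy
      exact h j (List.mem_range.mp hj)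

theorem portA_iff (id : String) :
    is_invalid_id_py id = true ↔ PowCond id.toList := by
  unfold is_invalid_id_py
  dsimp only
  have hfun : (fun (acc : Bool) (n : Int) =>
      if acc then acc
      else if PySem.Int.mod (id.toList.length : Int) n ≠ 0 then acc
      else
        let m := PySem.Int.floordiv (id.toList.length : Int) n
        let split_id := (PySem.List.pyRange 0 (id.toList.length : Int) m).map
          (fun i => PySem.List.slice id.toList (some i) (some (i + m)))
        if (PySem.Set.ofList split_id).length = 1 then true else acc)
      = fun (acc : Bool) (n : Int) =>
        if (decide (PySem.Int.mod (id.toList.length : Int) n = 0 ∧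
            (PySem.Set.ofList ((PySem.List.pyRange 0 (id.toList.length : Int)
                (PySem.Int.floordiv (id.toList.length : Int) n)).map
              (fun i => PySem.List.slice id.toList (some i)
                (some (i + PySem.Int.floordiv (id.toList.length : Int) n))))).length = 1))
          then true else acc := by
    funext acc n
    cases acc <;>
      by_cases hmod : PySem.Int.mod (id.toList.length : Int) n = 0 <;>
      by_cases hset : (PySem.Set.ofList ((PySem.List.pyRange 0 (id.toList.length : Int)
          (PySem.Int.floordiv (id.toList.length : Int) n)).map
        (fun i => PySem.List.slice id.toList (some i)
          (some (i + PySem.Int.floordiv (id.toList.length : Int) n))))).length = 1 <;>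
      simp_all
  rw [hfun, PySem.List.foldl_if_true_eq, Bool.false_or, List.any_eq_true]
  set cs := id.toList with hcs
  set L := cs.length with hL
  constructor
  · rintro ⟨n, hmem, hp⟩
    rw [PySem.List.mem_pyRange_one] at hmem
    rw [decide_eq_true_eq] at hp
    obtain ⟨hmod, hset⟩ := hp
    obtain ⟨hn2, hnL⟩ := hmem
    set N := n.toNat with hN
    have hneq : n = (N : Int) := by omega
    have hdvd : N ∣ L := by
      rw [PySem.Int.mod_eq_zero_iff_dvd, hneq] at hmod
      exact_mod_cast hmod
    have hN2 : 2 ≤ N := by omega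
    have hNL : N ≤ L := by
      rcases hdvd with ⟨c, hc⟩
      rcases Nat.eq_zero_or_pos c with rfl | hc0
      · omega
      · calc N = N * 1 := (Nat.mul_one N).symm
          _ ≤ N * c := Nat.mul_le_mul_left N hc0
          _ = L := hc.symm
    set m := L / N with hmdef
    have hmN : m * N = L := Nat.div_mul_cancel hdvd
    have hm : 0 < m := Nat.div_pos hNL (by omega)
    have hfd : PySem.Int.floordiv (L : Int) n = (m : Int) := by
      rw [hneq, PySem.Int.floordiv_natCast]
    rw [hfd] at hset
    have hper := (setcond_iff cs N m hm (by omega) hmN).mp hset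
    exact ⟨m, hm, by nlinarith, ⟨N, hmN.symm⟩, hper⟩
  · rintro ⟨m, hm, hmL, hdvd, hper⟩
    set N := L / m with hNdef
    have hmN : m * N = L := Nat.mul_div_cancel' hdvd
    have hN2 : 2 ≤ N := by nlinarith [Nat.lt_irrefl L]
    refine ⟨(N : Int), ?_, ?_⟩
    · rw [PySem.List.mem_pyRange_one]
      have hNL : N ≤ L := by nlinarith
      refine ⟨by exact_mod_cast hN2, by omega⟩
    · rw [decide_eq_true_eq]
      have hfd : PySem.Int.floordiv (L : Int) (N : Int) = (m : Int) := by
        rw [PySem.Int.floordiv_natCast]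
        congr 1
        rw [← hmN, Nat.mul_div_cancel _ (by omega)]
      refine ⟨?_, ?_⟩
      · rw [PySem.Int.mod_eq_zero_iff_dvd]
        have : N ∣ L := ⟨m, by rw [← hmN, Nat.mul_comm]⟩
        exact_mod_cast this
      · rw [hfd]
        exact (setcond_iff cs N m hm (by omega) hmN).mpr hper

theorem drop_append_self (cs : List Char) (k : ℕ) (hk : k ≤ cs.length) :
    (cs ++ cs).drop k = cs.drop k ++ cs := by
  rw [List.drop_append_of_le_length hk]

theorem powCond_of_overlap (cs : List Char) (k : ℕ) (hk1 : 1 ≤ k) (hk2 : k < cs.length)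
    (h : cs <+: (cs ++ cs).drop k) : PowCond cs := by
  rw [drop_append_self cs k (le_of_lt hk2), List.prefix_iff_getElem?] at h
  set L := cs.length with hL
  have hpk : cs.HasPeriod k := by
    rw [List.hasPeriod_iff_getElem?]
    intro i hi
    have h1 := h i (by omega)
    rw [List.getElem?_append_left (by simp; omega), List.getElem?_drop] at h1
    rw [show i + k = k + i from by omega, h1]
    exact List.getElem?_eq_getElem (by omega)
  have hpk' : cs.HasPeriod (L - k) := by
    rw [List.hasPeriod_iff_getElem?]
    intro j hj
    have h1 := h (j + (L - k)) (by omega)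
    rw [List.getElem?_append_right (by simp; omega)] at h1
    simp only [List.length_drop] at h1
    have he : j + (L - k) - (L - k) = j := by omega
    rw [he] at h1
    rw [h1, List.getElem?_eq_getElem (by omega)]
  have hg := hpk.gcd hpk' (by have := Nat.gcd_pos_of_pos_left (L - k) hk1; omega)
  refine ⟨Nat.gcd k (L - k), Nat.gcd_pos_of_pos_left _ hk1, ?_, ?_, hg⟩
  · have h1 : Nat.gcd k (L - k) ∣ k := Nat.gcd_dvd_left _ _
    have := Nat.le_of_dvd hk1 h1
    omega
  · have h1 := Nat.gcd_dvd_left k (L - k)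
    have h2 := Nat.gcd_dvd_right k (L - k)
    have : Nat.gcd k (L - k) ∣ k + (L - k) := Nat.dvd_add h1 h2
    have he : k + (L - k) = L := by omega
    rwa [he] at this

theorem overlap_of_powCond (cs : List Char) (m : ℕ) (hml : m < cs.length)
    (hdvd : m ∣ cs.length) (per : cs.HasPeriod m) : cs <+: (cs ++ cs).drop m := by
  have perM := per
  rw [drop_append_self cs m (le_of_lt hml), List.prefix_iff_getElem?]
  rw [List.hasPeriod_iff_getElem?] at per
  set L := cs.length with hL
  intro i hi
  by_cases hcase : i < L - m
  · rw [List.getElem?_append_left (by simp [← hL]; omega), List.getElem?_drop,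
      show m + i = i + m from by omega, ← per i (by omega)]
    exact List.getElem?_eq_getElem (by omega)
  · rw [List.getElem?_append_right (by simp [← hL]; omega)]
    simp only [List.length_drop, ← hL]
    have hmLm : m ∣ L - m := (Nat.dvd_sub hdvd dvd_rfl)
    have h1 := perM.getElem?_mod m i cs hi
    have h2 := perM.getElem?_mod m (i - (L - m)) cs (by omega)
    obtain ⟨c, hc⟩ := hmLm
    have hmod : i % m = (i - (L - m)) % m := by
      conv_lhs => rw [show i = (i - (L - m)) + m * c by omega]
      exact Nat.add_mul_mod_self_left _ _ _
    rw [← h2, ← hmod, h1, List.getElem?_eq_getElem (by omega)]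

theorem portB_iff (id : String) :
    is_invalid_id_py_alt id = true ↔ PowCond id.toList := by
  unfold is_invalid_id_py_alt
  dsimp only
  rw [Bool.and_eq_true, decide_eq_true_eq, decide_eq_true_eq]
  set cs := id.toList with hcs
  set L := cs.length with hL
  rcases Nat.lt_or_ge L 2 with hL2 | hL2
  · constructor
    · rintro ⟨h1, -⟩
      exact absurd h1 (by omega)
    · rintro ⟨m, hm, hmL, -, -⟩
      exact absurd hL2 (by omega)
  · have hlen1 : (1 : ℕ) ≤ (cs ++ cs).length := by simp; omega
    have hiff := PySem.Chars.findFrom_natCast_eq_neg_one_iff (cs ++ cs) cs 1 hlen1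
    rw [Nat.cast_one] at hiff
    have hne : PySem.Chars.findFrom (cs ++ cs) cs 1 ≠ -1 := by
      rw [Ne, hiff]
      intro hcon
      exact hcon ⟨cs.drop 1, [], by
        rw [List.append_nil, ← drop_append_self cs 1 (by omega)]⟩
    have hspec := PySem.Chars.findFrom_natCast_spec (cs ++ cs) cs 1 hlen1
      (by rwa [Nat.cast_one])
    rw [Nat.cast_one] at hspec
    obtain ⟨hge, hpre, hmin⟩ := hspec
    set f := PySem.Chars.findFrom (cs ++ cs) cs 1 with hf
    constructor
    · rintro ⟨-, hflt⟩
      exact powCond_of_overlap cs f.toNat (by omega) (by omega) hpre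
    · rintro ⟨m, hm, hmL, hdvd, hper⟩
      have hocc := overlap_of_powCond cs m hmL hdvd hper
      have hfm : f.toNat ≤ m := by
        by_contra hcon
        exact hmin m (by omega) (by omega) hocc
      exact ⟨by omega, by omega⟩

-- ===== VERDICT (by name: the statement is the Claim_ definition above) =====
theorem is_invalid_id_py_spec : Claim_equal_is_invalid_id_py := by
  intro id _
  unfold Spec_is_invalid_id_py
  exact Bool.coe_iff_coe.mp ((portA_iff id).trans (portB_iff id).symm)
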